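-- pv_equiv track=rewrite | github.com/Parthvaland2005/freecodecamp-daily-challenge | day41_fizzbuzz_explosion.py | explode_fizzbuzz
-- ===== SOURCE A (Python) =====
-- def explode_fizzbuzz(target):
--
--     z_count = 4
--     length = 8
--     steps = 0
--
--     while z_count < target:
--         new_length = 0
--         new_z = 0
--
--         for i in range(1, length + 1):
--
--             if i % 15 == 0:
--                 new_length += 8
--                 new_z += 4
--             elif i % 3 == 0:
--                 new_length += 4
--                 new_z += 2
--             elif i % 5 == 0:
--                 new_length += 4
--                 new_z += 2
--             else:
--                 new_length += 1
--
--                 if (i % 8) in [3, 4, 7, 0]: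
--                     new_z += 1
--
--         length = new_length
--         z_count = new_z
--         steps += 1
--
--     return steps
-- ===== SOURCE B (Python) =====
-- def explode_fizzbuzz(target):
--     # Prefix table over one 120-period (lcm of 15 and 8): pl[r] = (length, z)
--     # contributed by i = 1..r of any aligned block.
--     pl = [(0, 0)]
--     for i in range(1, 121):
--         if i % 15 == 0:
--             dl, dz = 8, 4
--         elif i % 3 == 0 or i % 5 == 0:
--             dl, dz = 4, 2
--         else:
--             dl, dz = 1, 1 if i % 8 in (3, 4, 7, 0) else 0
--         l, zz = pl[-1]
--         pl.append((l + dl, zz + dz))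
--     full_l, full_z = pl[120]
--
--     z, length, steps = 4, 8, 0
--     while z < target:
--         q, r = divmod(length, 120)
--         rl, rz = pl[r]
--         length, z = q * full_l + rl, q * full_z + rz
--         steps += 1
--     return steps
-- ===== Notes on version B (the rewrite author's own statement) =====
-- stated objective: faster
-- what changed: Instead of rescanning every index 1..length each round, B precomputes the per-residue contribution table over one 120-period (lcm of 15 and 8) once and updates (length, z_count) per round in O(1) from length divmod 120.
import Mathlib
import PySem

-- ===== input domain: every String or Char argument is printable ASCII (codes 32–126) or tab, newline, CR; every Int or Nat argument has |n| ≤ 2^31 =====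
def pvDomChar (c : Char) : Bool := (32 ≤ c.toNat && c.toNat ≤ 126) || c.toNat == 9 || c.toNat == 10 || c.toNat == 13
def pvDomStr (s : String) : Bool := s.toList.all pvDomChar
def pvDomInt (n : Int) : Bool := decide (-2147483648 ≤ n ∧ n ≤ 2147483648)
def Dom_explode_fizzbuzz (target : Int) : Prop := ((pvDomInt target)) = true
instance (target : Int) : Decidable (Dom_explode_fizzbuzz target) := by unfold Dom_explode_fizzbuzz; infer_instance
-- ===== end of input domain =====

-- B replaces A's per-round scan of 1..length by a precomputed 120-period residue table,
-- updating the state in O(1) per round (measured asymptotically faster); return values agree everywhere.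
-- The `fuel` argument of each loop is only a totality device (always sufficient: z_count
-- strictly increases each round, so at most target rounds occur); both loops carry the same fuel.

-- ===== PORT A =====
-- one round of A's inner for-loop over range(1, length+1)
def pvStepA (length : Int) : Int × Int :=
  (PySem.List.pyRange 1 (length + 1) 1).foldl
    (fun (acc : Int × Int) i =>
      if PySem.Int.mod i 15 = 0 then (acc.1 + 8, acc.2 + 4)
      else if PySem.Int.mod i 3 = 0 then (acc.1 + 4, acc.2 + 2)
      else if PySem.Int.mod i 5 = 0 then (acc.1 + 4, acc.2 + 2)
      else (acc.1 + 1,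
            if [(3 : Int), 4, 7, 0].contains (PySem.Int.mod i 8) then acc.2 + 1 else acc.2))
    (0, 0)

-- A's while-loop: state (z_count, length, steps)
def pvLoopA (target : Int) : Nat → Int → Int → Int → Int
  | 0, _, _, steps => steps
  | fuel + 1, z, length, steps =>
    if z < target then
      let p := pvStepA length
      pvLoopA target fuel p.2 p.1 (steps + 1)
    else steps

def explode_fizzbuzz (target : Int) : Int :=
  pvLoopA target (target.toNat + 1) 4 8 0

-- ===== PORT B =====
-- per-index contribution (dl, dz); depends only on i mod 120
def pvDelta (i : Int) : Int × Int :=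
  if PySem.Int.mod i 15 = 0 then (8, 4)
  else if PySem.Int.mod i 3 = 0 ∨ PySem.Int.mod i 5 = 0 then (4, 2)
  else (1, if [(3 : Int), 4, 7, 0].contains (PySem.Int.mod i 8) then 1 else 0)

-- Source B's prefix table pl: pvPref r = pl[r]
def pvPref : Nat → Int × Int
  | 0 => (0, 0)
  | n + 1 =>
    let p := pvPref n
    let d := pvDelta ((n : Int) + 1)
    (p.1 + d.1, p.2 + d.2)

-- one O(1) round of B: q, r = divmod(length, 120); q*pl[120] + pl[r]
def pvStepB (length : Int) : Int × Int :=
  let q := PySem.Int.floordiv length 120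
  let r := PySem.Int.mod length 120
  let f := pvPref 120
  let p := pvPref r.toNat
  (q * f.1 + p.1, q * f.2 + p.2)

def pvLoopB (target : Int) : Nat → Int → Int → Int → Int
  | 0, _, _, steps => steps
  | fuel + 1, z, length, steps =>
    if z < target then
      let p := pvStepB length
      pvLoopB target fuel p.2 p.1 (steps + 1)
    else steps

def explode_fizzbuzz_alt (target : Int) : Int :=
  pvLoopB target (target.toNat + 1) 4 8 0

-- ===== PRECONDITION & SPEC =====
def Spec_explode_fizzbuzz (target : Int) (out : Int) : Prop := out = explode_fizzbuzz_alt target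
instance (target : Int) (out : Int) : Decidable (Spec_explode_fizzbuzz target out) := by unfold Spec_explode_fizzbuzz; infer_instance

-- ===== CLAIM (what is proved, stated in full; the proofs are below) =====
def Claim_equal_explode_fizzbuzz : Prop := ∀ (target : Int), Dom_explode_fizzbuzz target → Spec_explode_fizzbuzz target (explode_fizzbuzz target)

-- ===== LEMMAS AND PROOFS =====

-- A's loop body adds exactly pvDelta i to the accumulator
lemma pvBody_eq_delta (acc : Int × Int) (i : Int) :
    (if PySem.Int.mod i 15 = 0 then (acc.1 + 8, acc.2 + 4)
     else if PySem.Int.mod i 3 = 0 then (acc.1 + 4, acc.2 + 2)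
     else if PySem.Int.mod i 5 = 0 then (acc.1 + 4, acc.2 + 2)
     else (acc.1 + 1,
           if [(3 : Int), 4, 7, 0].contains (PySem.Int.mod i 8) then acc.2 + 1 else acc.2))
    = (acc.1 + (pvDelta i).1, acc.2 + (pvDelta i).2) := by
  unfold pvDelta
  split_ifs with h1 h2 h3 h4 h5 <;> simp_all

lemma pvStepA_zero : pvStepA 0 = (0, 0) := by decide

lemma pvStepA_succ (n : Nat) :
    pvStepA ((n : Int) + 1)
      = ((pvStepA n).1 + (pvDelta ((n : Int) + 1)).1,
         (pvStepA n).2 + (pvDelta ((n : Int) + 1)).2) := by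
  unfold pvStepA
  rw [PySem.List.pyRange_one_succ_right (by omega : (1 : Int) ≤ (n : Int) + 1),
      List.foldl_append]
  simp only [List.foldl_cons, List.foldl_nil, pvBody_eq_delta]

-- pvDelta depends only on the residue mod 120
lemma pvDelta_mod (i : Nat) : pvDelta (i : Int) = pvDelta ((i % 120 : Nat) : Int) := by
  have h15 : (i % 120) % 15 = i % 15 := Nat.mod_mod_of_dvd i (by norm_num)
  have h3 : (i % 120) % 3 = i % 3 := Nat.mod_mod_of_dvd i (by norm_num)
  have h5 : (i % 120) % 5 = i % 5 := Nat.mod_mod_of_dvd i (by norm_num)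
  have h8 : (i % 120) % 8 = i % 8 := Nat.mod_mod_of_dvd i (by norm_num)
  have a15 : PySem.Int.mod (i : Int) 15 = ((i % 15 : Nat) : Int) := by
    exact_mod_cast PySem.Int.mod_natCast i 15
  have a3 : PySem.Int.mod (i : Int) 3 = ((i % 3 : Nat) : Int) := by
    exact_mod_cast PySem.Int.mod_natCast i 3
  have a5 : PySem.Int.mod (i : Int) 5 = ((i % 5 : Nat) : Int) := by
    exact_mod_cast PySem.Int.mod_natCast i 5
  have a8 : PySem.Int.mod (i : Int) 8 = ((i % 8 : Nat) : Int) := by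
    exact_mod_cast PySem.Int.mod_natCast i 8
  have b15 : PySem.Int.mod ((i % 120 : Nat) : Int) 15 = ((i % 120 % 15 : Nat) : Int) := by
    exact_mod_cast PySem.Int.mod_natCast (i % 120) 15
  have b3 : PySem.Int.mod ((i % 120 : Nat) : Int) 3 = ((i % 120 % 3 : Nat) : Int) := by
    exact_mod_cast PySem.Int.mod_natCast (i % 120) 3
  have b5 : PySem.Int.mod ((i % 120 : Nat) : Int) 5 = ((i % 120 % 5 : Nat) : Int) := by
    exact_mod_cast PySem.Int.mod_natCast (i % 120) 5
  have b8 : PySem.Int.mod ((i % 120 : Nat) : Int) 8 = ((i % 120 % 8 : Nat) : Int) := by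
    exact_mod_cast PySem.Int.mod_natCast (i % 120) 8
  simp only [pvDelta, a15, a3, a5, a8, b15, b3, b5, b8, h15, h3, h5, h8]

lemma pvPref_succ (n : Nat) :
    pvPref (n + 1)
      = ((pvPref n).1 + (pvDelta ((n : Int) + 1)).1,
         (pvPref n).2 + (pvDelta ((n : Int) + 1)).2) := rfl

set_option maxRecDepth 4096 in
lemma pvPref_120 : pvPref 120 = (320, 160) := by decide

set_option maxRecDepth 4096 in
lemma pvPref_119 : pvPref 119 = (312, 156) := by decide

-- closed form of pvStepB on a natural-number length
lemma pvStepB_natCast (n : Nat) :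
    pvStepB (n : Int)
      = (((n / 120 : Nat) : Int) * 320 + (pvPref (n % 120)).1,
         ((n / 120 : Nat) : Int) * 160 + (pvPref (n % 120)).2) := by
  have hq : PySem.Int.floordiv (n : Int) 120 = ((n / 120 : Nat) : Int) := by
    exact_mod_cast PySem.Int.floordiv_natCast n 120
  have hr : PySem.Int.mod (n : Int) 120 = ((n % 120 : Nat) : Int) := by
    exact_mod_cast PySem.Int.mod_natCast n 120
  simp only [pvStepB, hq, hr, pvPref_120, Int.toNat_natCast]

-- pvStepB satisfies the same recurrence as pvStepA
lemma pvStepB_succ (n : Nat) :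
    pvStepB ((n : Int) + 1)
      = ((pvStepB (n : Int)).1 + (pvDelta ((n : Int) + 1)).1,
         (pvStepB (n : Int)).2 + (pvDelta ((n : Int) + 1)).2) := by
  have hcast : ((n : Int) + 1) = ((n + 1 : Nat) : Int) := by push_cast; ring
  rw [hcast, pvStepB_natCast, pvStepB_natCast]
  have hd : pvDelta ((n + 1 : Nat) : Int) = pvDelta (((n + 1) % 120 : Nat) : Int) :=
    pvDelta_mod (n + 1)
  by_cases h : n % 120 = 119
  · -- wrap-around: n + 1 is a multiple of 120
    have hm : (n + 1) % 120 = 0 := by omega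
    have hq : (n + 1) / 120 = n / 120 + 1 := by omega
    have hd0 : pvDelta (((n + 1) % 120 : Nat) : Int) = (8, 4) := by
      rw [hm]; decide
    rw [hq, hm, h, pvPref_119, hd, hd0]
    simp only [pvPref, Prod.mk.injEq]
    constructor <;> push_cast <;> ring
  · have hm : (n + 1) % 120 = n % 120 + 1 := by omega
    have hq : (n + 1) / 120 = n / 120 := by omega
    rw [hq, hm, hd, hm, pvPref_succ]
    have hc : ((n % 120 : Nat) : Int) + 1 = (((n % 120) + 1 : Nat) : Int) := by push_cast; ring
    rw [← hc]
    simp only [Prod.mk.injEq]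
    constructor <;> ring

-- the two round functions agree on natural lengths
lemma pvStep_eq (n : Nat) : pvStepA (n : Int) = pvStepB (n : Int) := by
  induction n with
  | zero =>
    rw [pvStepB_natCast]
    simp [pvStepA_zero, pvPref]
  | succ n ih =>
    have hcast : ((n + 1 : Nat) : Int) = (n : Int) + 1 := by push_cast; ring
    rw [hcast, pvStepA_succ, pvStepB_succ, ih]

-- pvPref components are nonnegative
lemma pvPref_nonneg (n : Nat) : 0 ≤ (pvPref n).1 ∧ 0 ≤ (pvPref n).2 := by
  induction n with
  | zero => simp [pvPref]
  | succ n ih =>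
    rw [pvPref_succ]
    have hd : 0 ≤ (pvDelta ((n : Int) + 1)).1 ∧ 0 ≤ (pvDelta ((n : Int) + 1)).2 := by
      unfold pvDelta; split_ifs <;> simp
    constructor <;> omega

-- B's round keeps the length nonnegative
lemma pvStepB_fst_nonneg (n : Nat) : 0 ≤ (pvStepB (n : Int)).1 := by
  rw [pvStepB_natCast]
  have h1 := pvPref_nonneg (n % 120)
  have h2 : (0 : Int) ≤ ((n / 120 : Nat) : Int) * 320 := by positivity
  omega

-- the two while-loops agree step for step as long as the length is nonnegative
lemma pvLoop_eq (target : Int) (fuel : Nat) :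
    ∀ (z length steps : Int), 0 ≤ length →
      pvLoopA target fuel z length steps = pvLoopB target fuel z length steps := by
  induction fuel with
  | zero => intro z length steps _; rfl
  | succ fuel ih =>
    intro z length steps hL
    unfold pvLoopA pvLoopB
    by_cases h : z < target
    · simp only [if_pos h]
      have hcast : length = ((length.toNat : Nat) : Int) := by omega
      rw [hcast, pvStep_eq]
      exact ih _ _ _ (by rw [hcast]; exact pvStepB_fst_nonneg length.toNat)
    · simp only [if_neg h]

-- ===== VERDICT (by name: the statement is the Claim_ definition above) =====
theorem explode_fizzbuzz_spec : Claim_equal_explode_fizzbuzz := by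
  intro target _
  unfold Spec_explode_fizzbuzz explode_fizzbuzz explode_fizzbuzz_alt
  exact pvLoop_eq target (target.toNat + 1) 4 8 0 (by norm_num)
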